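-- pv_equiv track=rewrite | github.com/smezin/GOOGLE-foobar-challenge | foobarC2/part_one/sandbox/bin_tree.py | rec_search_it
-- ===== SOURCE A (Python) =====
-- def rec_search_it(top_node: int, value: int, node_offset: int):
--
--     subtree_top_node = top_node // 2
--     left_child = subtree_top_node + node_offset
--     right_child = left_child + subtree_top_node
--     if (left_child == value or right_child == value or top_node == 0):
--         return right_child + 1
--     if value < left_child:
--         return rec_search_it(subtree_top_node, value, node_offset)
--     else:
--         node_offset = left_child
--         return rec_search_it(subtree_top_node, value, left_child)
-- ===== SOURCE B (Python) =====
-- def rec_search_it(top_node, value, node_offset):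
--     # Iterative: the subtree size at depth d is just top_node >> d, so walk an
--     # explicit shift counter instead of recursing on a halved accumulator.
--     off = node_offset
--     shift = 1
--     while True:
--         s = top_node >> shift
--         left = s + off
--         right = left + s
--         if left == value or right == value or s == 0:
--             return right + 1
--         if value >= left:
--             off = left
--         shift += 1
-- ===== Notes on version B (the rewrite author's own statement) =====
-- stated objective: alternative
-- what changed: Replaces A's recursion on a halved accumulator with an iterative while-loop over an explicit shift counter that recomputes each subtree size as top_node >> shift, updating only the offset in place and testing s == 0 instead of top_node == 0.
-- outside the precondition, e.g. on rec_search_it(-2, -1, 0): A returns -1, B returns -1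
import Mathlib
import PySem

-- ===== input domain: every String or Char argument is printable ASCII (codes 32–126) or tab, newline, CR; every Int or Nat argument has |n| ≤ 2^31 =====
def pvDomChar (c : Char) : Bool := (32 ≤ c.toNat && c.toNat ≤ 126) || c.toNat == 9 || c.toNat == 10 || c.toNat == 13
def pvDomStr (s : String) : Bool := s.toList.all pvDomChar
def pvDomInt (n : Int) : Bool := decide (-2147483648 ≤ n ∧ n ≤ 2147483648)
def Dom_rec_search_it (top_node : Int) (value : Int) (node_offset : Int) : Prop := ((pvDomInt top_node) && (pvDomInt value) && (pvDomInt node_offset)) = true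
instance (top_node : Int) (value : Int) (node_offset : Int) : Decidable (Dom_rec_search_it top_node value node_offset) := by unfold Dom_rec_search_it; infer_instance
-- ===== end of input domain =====

-- B replaces A's recursion on a halved accumulator by an iterative loop over a shift
-- counter (subtree size recomputed as top_node >> shift); return value equivalence only.
-- ===== PORT A =====
-- Totality guard: for top_node < 0 Python's halving sticks at -1 and the recursion is
-- unbounded (RecursionError except on early matches); such inputs are outside Pre_.
def rec_search_it (top_node : Int) (value : Int) (node_offset : Int) : Int :=
  let subtree_top_node := PySem.Int.floordiv top_node 2
  let left_child := subtree_top_node + node_offset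
  let right_child := left_child + subtree_top_node
  if left_child = value ∨ right_child = value ∨ top_node = 0 then
    right_child + 1
  else if top_node < 0 then
    right_child + 1  -- totality guard, unreachable under Pre_
  else if value < left_child then
    rec_search_it subtree_top_node value node_offset
  else
    rec_search_it subtree_top_node value left_child
termination_by top_node.toNat
decreasing_by
  all_goals
    rw [PySem.Int.floordiv_eq_ediv_of_pos (by omega)]
    omega

-- ===== PORT B =====
-- the body of Source B's `while True:` loop; `off` is the mutable local, `>>>` is Python's `>>`
def rec_search_it_altGo (top_node : Int) (value : Int) (shift : Nat) (off : Int) : Int :=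
  let s := top_node >>> shift
  let left := s + off
  let right := left + s
  if left = value ∨ right = value ∨ s = 0 then
    right + 1
  else if s < 0 then
    right + 1  -- totality guard, unreachable under Pre_
  else
    rec_search_it_altGo top_node value (shift + 1) (if value ≥ left then left else off)
termination_by PySem.Int.bitLength top_node - shift
decreasing_by
  rename_i hbase hneg
  simp only [not_or] at hbase
  obtain ⟨-, -, hs0⟩ := hbase
  have hs : (1:Int) ≤ top_node >>> shift := by omega
  rw [Int.shiftRight_eq_div_pow] at hs
  have hpow : (0:Int) < ((2 ^ shift : Nat) : Int) := by positivity
  have ht : ((2 ^ shift : Nat) : Int) ≤ top_node := by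
    have h := (Int.le_ediv_iff_mul_le hpow).mp hs
    simpa using h
  have h2 : 2 ^ shift ≤ top_node.natAbs := by omega
  have hbits := (Nat.pow_lt_pow_iff_right (a := 2) (by omega)).mp
    (lt_of_le_of_lt h2 (PySem.Int.lt_two_pow_bitLength top_node))
  omega

def rec_search_it_alt (top_node : Int) (value : Int) (node_offset : Int) : Int :=
  rec_search_it_altGo top_node value 1 node_offset

-- ===== PRECONDITION & SPEC =====
-- Pre_ excludes negative top_node: there Python A's floor-halving chain sticks at -1 and the
-- recursion overflows the stack (RecursionError) unless a match happens within the first levels.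
def Pre_rec_search_it (top_node : Int) (value : Int) (node_offset : Int) : Prop :=
  0 ≤ top_node
instance (top_node : Int) (value : Int) (node_offset : Int) : Decidable (Pre_rec_search_it top_node value node_offset) := by unfold Pre_rec_search_it; infer_instance
def pvWitness_rec_search_it : Int × Int × Int := (22, 9, 0)
def Spec_rec_search_it (top_node : Int) (value : Int) (node_offset : Int) (out : Int) : Prop := out = rec_search_it_alt top_node value node_offset
instance (top_node : Int) (value : Int) (node_offset : Int) (out : Int) : Decidable (Spec_rec_search_it top_node value node_offset out) := by unfold Spec_rec_search_it; infer_instance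

-- ===== CLAIM (what is proved, stated in full; the proofs are below) =====
def Claim_equal_rec_search_it : Prop := ∀ (top_node : Int) (value : Int) (node_offset : Int), Dom_rec_search_it top_node value node_offset → Pre_rec_search_it top_node value node_offset → Spec_rec_search_it top_node value node_offset (rec_search_it top_node value node_offset)

-- ===== LEMMAS AND PROOFS =====
lemma shiftR_eq (t0 : Int) (n : Nat) : t0 >>> n = t0 / (2:Int) ^ n := by
  rw [Int.shiftRight_eq_div_pow]; push_cast; rfl

lemma floordiv_two (t : Int) : PySem.Int.floordiv t 2 = t / 2 :=
  PySem.Int.floordiv_eq_ediv_of_pos (by omega)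

lemma rec_small (v t off : Int) (h0 : 0 ≤ t) (h1 : t ≤ 1) :
    rec_search_it t v off = off + 1 := by
  have ez : rec_search_it 0 v off = off + 1 := by
    rw [rec_search_it]
    norm_num [show PySem.Int.floordiv 0 2 = 0 from by decide]
  interval_cases t
  · exact ez
  · rw [rec_search_it]
    simp only [show PySem.Int.floordiv 1 2 = 0 from by decide, zero_add, add_zero]
    split_ifs
    · rfl
    · omega
    · exact ez
    · exact ez

lemma key (k : Nat) : ∀ (t0 v : Int) (sh : Nat) (off : Int), 0 ≤ t0 → t0 < 2 ^ (sh + 1 + k) →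
    rec_search_it (t0 / 2 ^ sh) v off = rec_search_it_altGo t0 v (sh + 1) off := by
  induction k with
  | zero =>
    intro t0 v sh off h0 hlt
    have hs : t0 >>> (sh + 1) = 0 := by
      rw [shiftR_eq]
      exact Int.ediv_eq_zero_of_lt h0 (by simpa using hlt)
    rw [rec_search_it_altGo]
    simp only [hs, zero_add, add_zero]
    have ht0 : 0 ≤ t0 / 2 ^ sh := Int.ediv_nonneg h0 (by positivity)
    have ht1 : t0 / 2 ^ sh ≤ 1 := by
      have h2 : t0 / 2 ^ sh < 2 := by
        rw [Int.ediv_lt_iff_lt_mul (by positivity)]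
        calc t0 < 2 ^ (sh + 1 + 0) := hlt
          _ = 2 * 2 ^ sh := by rw [pow_add, pow_add]; ring
      omega
    rw [rec_small v _ off ht0 ht1]
    simp
  | succ k ih =>
    intro t0 v sh off h0 hlt
    have hcomp : t0 / 2 ^ sh / 2 = t0 / 2 ^ (sh + 1) := by
      rw [Int.ediv_ediv_of_nonneg (by positivity), pow_succ]
    have hd0 : 0 ≤ t0 / 2 ^ (sh + 1) := Int.ediv_nonneg h0 (by positivity)
    by_cases hz : t0 / 2 ^ (sh + 1) = 0
    · -- the next subtree size is already 0: both sides return off + 1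
      rw [rec_search_it_altGo]
      simp only [shiftR_eq, hz, zero_add, add_zero]
      have ht0 : 0 ≤ t0 / 2 ^ sh := Int.ediv_nonneg h0 (by positivity)
      have ht1 : t0 / 2 ^ sh ≤ 1 := by omega
      rw [rec_small v _ off ht0 ht1]
      simp
    · rw [rec_search_it, rec_search_it_altGo]
      simp only [shiftR_eq, floordiv_two, hcomp]
      have htpos : ¬ (t0 / 2 ^ sh = 0) := by omega
      have htneg : ¬ (t0 / 2 ^ sh < 0) := by omega
      have hdneg : ¬ (t0 / 2 ^ (sh + 1) < 0) := by omega
      have hbound : t0 < 2 ^ (sh + 1 + 1 + k) := by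
        have : sh + 1 + 1 + k = sh + 1 + (k + 1) := by omega
        rw [this]; exact hlt
      by_cases h1 : t0 / 2 ^ (sh + 1) + off = v ∨ t0 / 2 ^ (sh + 1) + off + t0 / 2 ^ (sh + 1) = v
      · rw [if_pos (by tauto), if_pos (by tauto)]
      · have hA : ¬(t0 / 2 ^ (sh + 1) + off = v ∨ t0 / 2 ^ (sh + 1) + off + t0 / 2 ^ (sh + 1) = v ∨ t0 / 2 ^ sh = 0) := by tauto
        have hB : ¬(t0 / 2 ^ (sh + 1) + off = v ∨ t0 / 2 ^ (sh + 1) + off + t0 / 2 ^ (sh + 1) = v ∨ t0 / 2 ^ (sh + 1) = 0) := by tauto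
        rw [if_neg hA, if_neg htneg, if_neg hB, if_neg hdneg]
        by_cases h2 : v < t0 / 2 ^ (sh + 1) + off
        · rw [if_pos h2, if_neg (by omega)]
          exact ih t0 v (sh + 1) off h0 hbound
        · rw [if_neg h2, if_pos (by omega)]
          exact ih t0 v (sh + 1) (t0 / 2 ^ (sh + 1) + off) h0 hbound

-- ===== VERDICT (by name: the statement is the Claim_ definition above) =====
theorem rec_search_it_spec : Claim_equal_rec_search_it := by
  intro t v off _ hpre
  unfold Spec_rec_search_it rec_search_it_alt
  have hb : ((t.toNat : Int)) < (2:Int) ^ t.toNat := by exact_mod_cast Nat.lt_two_pow_self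
  have hmono : (2:Int) ^ t.toNat ≤ (2:Int) ^ (0 + 1 + t.toNat) :=
    pow_le_pow_right₀ (by norm_num) (by omega)
  have h := key t.toNat t v 0 off hpre (by unfold Pre_rec_search_it at hpre; omega)
  simpa using h
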